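-- pv_equiv track=rewrite | github.com/Three-Pointers03/PuchAI-Hackathon-MCP-Server | mcp-starter/mcp-bearer-token/mcp_starter.py | _availability_overlap
-- ===== SOURCE A (Python) =====
-- def _availability_overlap(a: list[dict], b: list[dict]) -> tuple[bool, str | None]:
--     # naive overlap: same day string and time window intersection
--     def parse_time(hm: str) -> tuple[int, int]:
--         try:
--             hh, mm = hm.split(":")
--             return int(hh), int(mm)
--         except Exception:
--             return 0, 0
--
--     for wa in a or []:
--         day_a = str(wa.get("day", "")).strip().lower()
--         sa = str(wa.get("start", "00:00"))
--         ea = str(wa.get("end", "00:00"))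
--         for wb in b or []:
--             day_b = str(wb.get("day", "")).strip().lower()
--             if day_a and day_a == day_b:
--                 ah, am = parse_time(sa)
--                 bh, bm = parse_time(wb.get("start", "00:00"))
--                 aeh, aem = parse_time(ea)
--                 beh, bem = parse_time(wb.get("end", "00:00"))
--                 start_a = ah * 60 + am
--                 end_a = aeh * 60 + aem
--                 start_b = bh * 60 + bm
--                 end_b = beh * 60 + bem
--                 start = max(start_a, start_b)
--                 end = min(end_a, end_b)
--                 if end > start:
--                     # format overlap window hh:mm-hh:mm
--                     sh, sm = divmod(start, 60)
--                     eh, em = divmod(end, 60)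
--                     return True, f"{day_a.title()} {sh:02d}:{sm:02d}-{eh:02d}:{em:02d}"
--     return False, None
-- ===== SOURCE B (Python) =====
-- def _availability_overlap(a: list[dict], b: list[dict]) -> tuple[bool, str | None]:
--     # bucket b's windows by day (parsed to minutes once), then scan a against its day's bucket
--     def parse_time(hm: str) -> tuple[int, int]:
--         try:
--             hh, mm = hm.split(":")
--             return int(hh), int(mm)
--         except Exception:
--             return 0, 0
--
--     def minutes(hm) -> int:
--         h, m = parse_time(hm)
--         return h * 60 + m
--
--     buckets = {}
--     for wb in b or []:
--         day_b = str(wb.get("day", "")).strip().lower()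
--         pair = (minutes(wb.get("start", "00:00")), minutes(wb.get("end", "00:00")))
--         buckets[day_b] = buckets.get(day_b, []) + [pair]
--
--     for wa in a or []:
--         day_a = str(wa.get("day", "")).strip().lower()
--         if not day_a:
--             continue
--         start_a = minutes(str(wa.get("start", "00:00")))
--         end_a = minutes(str(wa.get("end", "00:00")))
--         for sb, eb in buckets.get(day_a, []):
--             start = max(start_a, sb)
--             end = min(end_a, eb)
--             if end > start:
--                 sh, sm = divmod(start, 60)
--                 eh, em = divmod(end, 60)
--                 return True, f"{day_a.title()} {sh:02d}:{sm:02d}-{eh:02d}:{em:02d}"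
--     return False, None
-- ===== Notes on version B (the rewrite author's own statement) =====
-- stated objective: alternative
-- what changed: B builds a dict bucketing b's windows by normalized day with their times parsed to minutes once, then each a-window scans only its own day's bucket, instead of A's nested loops that re-parse every b-window (and a's own times) for every (a,b) pair.
import Mathlib
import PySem

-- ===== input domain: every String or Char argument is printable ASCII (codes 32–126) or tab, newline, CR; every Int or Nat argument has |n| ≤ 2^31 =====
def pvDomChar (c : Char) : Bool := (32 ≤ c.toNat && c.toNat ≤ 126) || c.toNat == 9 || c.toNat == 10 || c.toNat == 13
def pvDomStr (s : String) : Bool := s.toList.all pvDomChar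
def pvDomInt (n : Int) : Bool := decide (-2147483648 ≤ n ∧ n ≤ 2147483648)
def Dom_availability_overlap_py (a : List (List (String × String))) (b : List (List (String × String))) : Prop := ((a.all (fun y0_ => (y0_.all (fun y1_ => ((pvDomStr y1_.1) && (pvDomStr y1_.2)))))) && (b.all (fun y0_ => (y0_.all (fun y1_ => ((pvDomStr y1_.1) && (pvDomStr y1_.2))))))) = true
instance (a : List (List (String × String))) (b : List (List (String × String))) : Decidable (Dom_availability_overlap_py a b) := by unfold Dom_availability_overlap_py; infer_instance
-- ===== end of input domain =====

-- B replaces A's nested rescan of b (which re-parses every b-window for every a-window) by one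
-- bucketing pass: b's windows are parsed to minutes once and grouped by normalized day in a dict,
-- and each a-window scans only its own day's bucket (objective: alternative algorithm/data structure).

-- shared helpers: these pieces of code are IDENTICAL in both Python versions
-- dict.get(k, dflt) on the association list (first match, per the type convention)
def pget (w : List (String × String)) (k dflt : String) : String :=
  match w.find? (fun p => p.1 == k) with
  | some p => p.2
  | none => dflt

-- parse_time: hm.split(":") must give exactly 2 pieces and both must int()-parse, else (0, 0).
-- (Python tries int(hh) before int(mm); both failure orders yield the same caught-exception result.)
def parseTime (hm : String) : Int × Int :=
  match PySem.Str.split? hm ":" with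
  | some [hh, mm] =>
      match PySem.Int.ofStr? hh, PySem.Int.ofStr? mm with
      | some h, some m => (h, m)
      | _, _ => (0, 0)
  | _ => (0, 0)

-- str.title() on the (ASCII, per Dom) day string: a letter after a non-letter is uppercased,
-- a letter after a letter is lowercased; ASCII cased characters are exactly the letters
def titleChars : List Char → Bool → List Char
  | [], _ => []
  | c :: cs, prev =>
      if PySem.Chars.isalpha c then
        (if prev then PySem.Chars.lowerChar c else PySem.Chars.upperChar c) :: titleChars cs true
      else c :: titleChars cs false

-- f"{n:02d}" = str(n).zfill(2) for every int n (sign stays in front)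
def fmt02 (n : Int) : List Char := PySem.Chars.zfill (PySem.Int.toChars n) 2

-- divmod(m, 60) with the nonzero literal divisor 60, then "hh:mm"
def fmtHM (m : Int) : List Char :=
  fmt02 (PySem.Int.floordiv m 60) ++ ':' :: fmt02 (PySem.Int.mod m 60)

-- f"{day_a.title()} {sh:02d}:{sm:02d}-{eh:02d}:{em:02d}"
def fmtOverlap (day : String) (s e : Int) : String :=
  String.ofList (titleChars day.toList false ++ ' ' :: fmtHM s ++ '-' :: fmtHM e)

-- ===== PORT A =====
-- inner 'for wb in b' loop of A; returns the formatted window of the first overlap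
def loopB_A (day_a sa ea : String) : List (List (String × String)) → Option String
  | [] => none
  | wb :: rest =>
      let day_b := PySem.Str.lower (PySem.Str.strip (pget wb "day" ""))
      if day_a ≠ "" ∧ day_a = day_b then
        let ah := (parseTime sa).1
        let am := (parseTime sa).2
        let bh := (parseTime (pget wb "start" "00:00")).1
        let bm := (parseTime (pget wb "start" "00:00")).2
        let aeh := (parseTime ea).1
        let aem := (parseTime ea).2
        let beh := (parseTime (pget wb "end" "00:00")).1
        let bem := (parseTime (pget wb "end" "00:00")).2
        let start_a := ah * 60 + am
        let end_a := aeh * 60 + aem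
        let start_b := bh * 60 + bm
        let end_b := beh * 60 + bem
        let start := max start_a start_b
        let endv := min end_a end_b
        if endv > start then some (fmtOverlap day_a start endv)
        else loopB_A day_a sa ea rest
      else loopB_A day_a sa ea rest

-- outer 'for wa in a' loop of A
def loopA_A (b : List (List (String × String))) : List (List (String × String)) → Bool × Option String
  | [] => (false, none)
  | wa :: rest =>
      let day_a := PySem.Str.lower (PySem.Str.strip (pget wa "day" ""))
      let sa := pget wa "start" "00:00"
      let ea := pget wa "end" "00:00"
      match loopB_A day_a sa ea b with
      | some r => (true, some r)
      | none => loopA_A b rest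

def availability_overlap_py (a : List (List (String × String))) (b : List (List (String × String))) : Bool × Option String :=
  loopA_A b a

-- ===== PORT B =====
-- normalized day of a window
def bDay (w : List (String × String)) : String :=
  PySem.Str.lower (PySem.Str.strip (pget w "day" ""))

-- minutes(hm) = h * 60 + m of parse_time(hm)
def pmins (s : String) : Int := (parseTime s).1 * 60 + (parseTime s).2

-- buckets[day_b] = buckets.get(day_b, []) + [pair]  over b, building the day → parsed-windows dict
def bucketsOf (b : List (List (String × String))) : PySem.Dict String (List (Int × Int)) :=
  b.foldl
    (fun d wb =>
      d.modify (bDay wb) []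
        (· ++ [(pmins (pget wb "start" "00:00"), pmins (pget wb "end" "00:00"))]))
    PySem.Dict.empty

-- inner 'for sb, eb in buckets.get(day_a, [])' loop of B
def scanBucket (day_a : String) (start_a end_a : Int) : List (Int × Int) → Option String
  | [] => none
  | (sb, eb) :: rest =>
      let start := max start_a sb
      let endv := min end_a eb
      if endv > start then some (fmtOverlap day_a start endv)
      else scanBucket day_a start_a end_a rest

-- outer 'for wa in a' loop of B
def loopA_B (buckets : PySem.Dict String (List (Int × Int))) : List (List (String × String)) → Bool × Option String
  | [] => (false, none)
  | wa :: rest =>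
      let day_a := bDay wa
      if day_a = "" then loopA_B buckets rest
      else
        let start_a := pmins (pget wa "start" "00:00")
        let end_a := pmins (pget wa "end" "00:00")
        match scanBucket day_a start_a end_a (buckets.getD day_a []) with
        | some r => (true, some r)
        | none => loopA_B buckets rest

def availability_overlap_py_alt (a : List (List (String × String))) (b : List (List (String × String))) : Bool × Option String :=
  loopA_B (bucketsOf b) a

-- ===== PRECONDITION & SPEC =====
def Spec_availability_overlap_py (a : List (List (String × String))) (b : List (List (String × String))) (out : Bool × Option String) : Prop := out = availability_overlap_py_alt a b
instance (a : List (List (String × String))) (b : List (List (String × String))) (out : Bool × Option String) : Decidable (Spec_availability_overlap_py a b out) := by unfold Spec_availability_overlap_py; infer_instance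

-- ===== CLAIM (what is proved, stated in full; the proofs are below) =====
def Claim_equal_availability_overlap_py : Prop := ∀ (a : List (List (String × String))) (b : List (List (String × String))), Dom_availability_overlap_py a b → Spec_availability_overlap_py a b (availability_overlap_py a b)

-- ===== LEMMAS AND PROOFS =====
-- an empty normalized day never matches in A's inner loop
theorem loopB_A_empty_day (sa ea : String) (b : List (List (String × String))) :
    loopB_A "" sa ea b = none := by
  induction b with
  | nil => rfl
  | cons wb rest ih => simp [loopB_A, ih]

-- the parsed record B stores for a b-window
def bRec (w : List (String × String)) : String × (Int × Int) :=
  (bDay w, (pmins (pget w "start" "00:00"), pmins (pget w "end" "00:00")))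

-- the bucket for a day is exactly the parsed windows of b with that day, in order
theorem getD_bucketsOf (b : List (List (String × String))) (day : String) :
    (bucketsOf b).getD day [] =
      ((b.map bRec).filter (fun p => p.1 == day)).map (·.2) := by
  have h : bucketsOf b =
      (b.map bRec).foldl (fun d p => d.modify p.1 [] (· ++ [p.2])) PySem.Dict.empty := by
    rw [List.foldl_map]; rfl
  rw [h, PySem.Dict.getD_foldl_modify_append]
  simp [PySem.Dict.getD_empty]

-- definitional unfoldings of the loop bodies on a cons (the have-bindings zeta-reduce)
theorem loopB_A_cons (day_a sa ea : String) (wb : List (String × String))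
    (rest : List (List (String × String))) :
    loopB_A day_a sa ea (wb :: rest) =
      (if day_a ≠ "" ∧ day_a = PySem.Str.lower (PySem.Str.strip (pget wb "day" "")) then
        if min (pmins ea) (pmins (pget wb "end" "00:00")) >
            max (pmins sa) (pmins (pget wb "start" "00:00")) then
          some (fmtOverlap day_a (max (pmins sa) (pmins (pget wb "start" "00:00")))
            (min (pmins ea) (pmins (pget wb "end" "00:00"))))
        else loopB_A day_a sa ea rest
      else loopB_A day_a sa ea rest) := rfl

theorem scanBucket_cons (day : String) (sA eA sb eb : Int) (rest : List (Int × Int)) :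
    scanBucket day sA eA ((sb, eb) :: rest) =
      (if min eA eb > max sA sb then some (fmtOverlap day (max sA sb) (min eA eb))
      else scanBucket day sA eA rest) := rfl

theorem loopA_B_cons (buckets : PySem.Dict String (List (Int × Int)))
    (wa : List (String × String)) (rest : List (List (String × String))) :
    loopA_B buckets (wa :: rest) =
      (if bDay wa = "" then loopA_B buckets rest
      else
        match scanBucket (bDay wa) (pmins (pget wa "start" "00:00"))
            (pmins (pget wa "end" "00:00")) (buckets.getD (bDay wa) []) with
        | some r => (true, some r)
        | none => loopA_B buckets rest) := rfl

-- scanning the day's bucket is A's inner loop, for a nonempty day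
theorem scanBucket_eq_loopB_A (day sa ea : String) (hday : day ≠ "")
    (b : List (List (String × String))) :
    scanBucket day (pmins sa) (pmins ea) (((b.map bRec).filter (fun p => p.1 == day)).map (·.2))
      = loopB_A day sa ea b := by
  induction b with
  | nil => rfl
  | cons wb rest ih =>
      rw [loopB_A_cons]
      by_cases hd : bDay wb = day
      · have hd' : PySem.Str.lower (PySem.Str.strip (pget wb "day" "")) = day := hd
        simp only [List.map_cons, List.filter_cons, bRec, hd, beq_self_eq_true, if_true,
          List.map_cons]
        rw [scanBucket_cons,
          if_pos (show day ≠ "" ∧ day = PySem.Str.lower (PySem.Str.strip (pget wb "day" ""))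
            from ⟨hday, hd'.symm⟩)]
        split
        · rfl
        · exact ih
      · have hd' : ¬ PySem.Str.lower (PySem.Str.strip (pget wb "day" "")) = day := hd
        simp only [List.map_cons, List.filter_cons, bRec]
        rw [if_neg (by simp [hd])]
        rw [if_neg (fun h => hd' h.2.symm)]
        exact ih

-- outer loops agree
theorem loopA_eq (b a : List (List (String × String))) :
    loopA_A b a = loopA_B (bucketsOf b) a := by
  induction a with
  | nil => rfl
  | cons wa rest ih =>
      rw [loopA_A, loopA_B_cons]
      by_cases hday : bDay wa = ""
      · rw [if_pos hday]
        simp only [bDay] at hday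
        rw [hday, loopB_A_empty_day]
        exact ih
      · rw [if_neg hday]
        rw [getD_bucketsOf, scanBucket_eq_loopB_A (bDay wa) _ _ hday b]
        simp only [bDay]
        split
        · rfl
        · exact ih

-- ===== VERDICT (by name: the statement is the Claim_ definition above) =====
theorem availability_overlap_py_spec : Claim_equal_availability_overlap_py := by
  intro a b _
  show availability_overlap_py a b = availability_overlap_py_alt a b
  unfold availability_overlap_py availability_overlap_py_alt
  exact loopA_eq b a
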